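-- pv_equiv track=rewrite | github.com/zeropointnine/tts-toy | sentence_segmenter.py | _find_split_char_index
-- ===== SOURCE A (Python) =====
-- def _find_split_char_index(text, target_word_index):
--     """
--     Finds the starting character index in the original text for the word
--     at the 1-based target_word_index. Handles multiple spaces.
--     Returns -1 if index is out of bounds or word not found.
--     """
--     word_count = 0
--     in_word = False
--     start_index = -1
--
--     for i, char in enumerate(text):
--         is_space = char.isspace()
--
--         if not is_space and not in_word:
--             # Start of a new word
--             in_word = True
--             word_count += 1
--             if word_count == target_word_index:
--                 start_index = i
--                 break # Found the start of the target word
--         elif is_space: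
--             # End of a potential word
--             in_word = False
--
--     # If loop finishes without finding the start_index (e.g., target_word_index > actual words)
--     # start_index remains -1.
--     return start_index
-- ===== SOURCE B (Python) =====
-- def _find_split_char_index(text, target_word_index):
--     """Word-level chopping: repeatedly lstrip leading whitespace and peel off one
--     whole word from the front of the remaining string, counting down the target,
--     instead of scanning characters with an in_word flag."""
--     def word_len(s):
--         k = 0
--         while k < len(s) and not s[k].isspace():
--             k += 1
--         return k
--
--     if target_word_index < 1:
--         return -1
--     rest, pos, n = text, 0, target_word_index
--     while True:
--         trimmed = rest.lstrip()
--         if not trimmed: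
--             return -1
--         pos += len(rest) - len(trimmed)
--         if n == 1:
--             return pos
--         k = word_len(trimmed)
--         rest, pos, n = trimmed[k:], pos + k, n - 1
-- ===== Notes on version B (the rewrite author's own statement) =====
-- stated objective: alternative
-- what changed: Replaces A's single character scan with an in_word flag by word-level string chopping: a loop that counts down the target index, each iteration lstrip-ping leading whitespace and slicing one whole word off the front of the remaining string.
import Mathlib
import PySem

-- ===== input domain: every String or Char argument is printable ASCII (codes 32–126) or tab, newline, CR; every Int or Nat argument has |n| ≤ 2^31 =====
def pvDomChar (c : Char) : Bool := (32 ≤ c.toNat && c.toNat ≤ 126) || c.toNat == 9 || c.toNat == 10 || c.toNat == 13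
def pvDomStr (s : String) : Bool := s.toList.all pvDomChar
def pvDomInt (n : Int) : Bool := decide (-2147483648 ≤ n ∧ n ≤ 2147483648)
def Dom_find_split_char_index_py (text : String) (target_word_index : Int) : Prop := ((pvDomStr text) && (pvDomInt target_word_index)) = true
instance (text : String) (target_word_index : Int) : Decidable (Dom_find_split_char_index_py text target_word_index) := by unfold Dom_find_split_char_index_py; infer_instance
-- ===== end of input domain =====

-- B replaces A's per-character in_word state machine by word-level string chopping
-- (lstrip whitespace, slice one word off the front, count the target down); objective: alternative.

-- ===== PORT A =====
-- literal transliteration of A's for-loop with break: state (i, in_word, word_count)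
def loopA (t : Int) : List Char → Int → Bool → Int → Int
  | [], _, _, _ => -1
  | c :: cs, i, in_word, word_count =>
    let is_space := PySem.Chars.isspace c
    if !is_space && !in_word then
      -- start of a new word
      if word_count + 1 = t then i  -- start_index := i; break
      else loopA t cs (i + 1) true (word_count + 1)
    else if is_space then loopA t cs (i + 1) false word_count
    else loopA t cs (i + 1) in_word word_count

def find_split_char_index_py (text : String) (target_word_index : Int) : Int :=
  loopA target_word_index text.toList 0 false 0

-- ===== PORT B =====
-- Source B's word_len: the while loop counting leading non-space characters
def wordLenB : List Char → Nat
  | [] => 0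
  | c :: cs => if PySem.Chars.isspace c then 0 else 1 + wordLenB cs

-- Source B's while loop; the fuel n mirrors the count-down variable n (loop exits by n = 1
-- or empty trimmed; n starts ≥ 1 and decreases each iteration).  str.lstrip() is ported
-- exactly as dropWhile isspace on the character list.
def goB : List Char → Int → Nat → Int
  | _, _, 0 => -1
  | rest, pos, n + 1 =>
    let trimmed := rest.dropWhile PySem.Chars.isspace
    if trimmed.isEmpty then -1
    else
      let pos' := pos + ((rest.length : Int) - (trimmed.length : Int))
      if n = 0 then pos'
      else goB (trimmed.drop (wordLenB trimmed)) (pos' + (wordLenB trimmed : Int)) n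

def find_split_char_index_py_alt (text : String) (target_word_index : Int) : Int :=
  if target_word_index < 1 then -1
  else goB text.toList 0 target_word_index.toNat

-- ===== PRECONDITION & SPEC =====
def Spec_find_split_char_index_py (text : String) (target_word_index : Int) (out : Int) : Prop := out = find_split_char_index_py_alt text target_word_index
instance (text : String) (target_word_index : Int) (out : Int) : Decidable (Spec_find_split_char_index_py text target_word_index out) := by unfold Spec_find_split_char_index_py; infer_instance

-- ===== CLAIM (what is proved, stated in full; the proofs are below) =====
def Claim_equal_find_split_char_index_py : Prop := ∀ (text : String) (target_word_index : Int), Dom_find_split_char_index_py text target_word_index → Spec_find_split_char_index_py text target_word_index (find_split_char_index_py text target_word_index)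

-- ===== LEMMAS AND PROOFS =====

theorem isspace_space : PySem.Chars.isspace ' ' = true := by decide

-- word starts of cs at offsets from i, given the character preceding cs is `prev`
def startsFrom (prev : Char) : List Char → Int → List Int
  | [], _ => []
  | c :: cs, i =>
    if PySem.Chars.isspace prev && !PySem.Chars.isspace c then i :: startsFrom c cs (i + 1)
    else startsFrom c cs (i + 1)

-- A's loop, given in_word = ¬(prev is space), computes a lookup into startsFrom
theorem loopA_eq (t : Int) (cs : List Char) : ∀ (prev : Char) (i wc : Int),
    loopA t cs i (!PySem.Chars.isspace prev) wc =
      (if wc < t ∧ t ≤ wc + ((startsFrom prev cs i).length : Int) then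
        (startsFrom prev cs i).getD (t - wc - 1).toNat (-1)
      else -1) := by
  induction cs with
  | nil => intro prev i wc; simp [loopA, startsFrom]
  | cons c cs ih =>
    intro prev i wc
    by_cases hc : PySem.Chars.isspace c = true
    · have h1 : loopA t (c :: cs) i (!PySem.Chars.isspace prev) wc
          = loopA t cs (i + 1) (!PySem.Chars.isspace c) wc := by
        simp [loopA, hc]
      have h2 : startsFrom prev (c :: cs) i = startsFrom c cs (i + 1) := by
        simp [startsFrom, hc]
      rw [h1, h2, ih]
    · by_cases hp : PySem.Chars.isspace prev = true
      · have h2 : startsFrom prev (c :: cs) i = i :: startsFrom c cs (i + 1) := by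
          simp [startsFrom, hc, hp]
        have h1 : loopA t (c :: cs) i (!PySem.Chars.isspace prev) wc
            = if wc + 1 = t then i else loopA t cs (i + 1) (!PySem.Chars.isspace c) (wc + 1) := by
          simp [loopA, hc, hp]
        rw [h1, h2]
        by_cases ht : wc + 1 = t
        · have hcond : wc < t ∧ t ≤ wc + ((i :: startsFrom c cs (i + 1)).length : Int) := by
            constructor <;> [omega; (simp; omega)]
          have h0 : (t - wc - 1).toNat = 0 := by omega
          rw [if_pos ht, if_pos hcond, h0]
          simp
        · rw [if_neg ht, ih]
          by_cases h3 : wc + 1 < t ∧ t ≤ wc + 1 + ((startsFrom c cs (i + 1)).length : Int)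
          · have h4 : wc < t ∧ t ≤ wc + ((i :: startsFrom c cs (i + 1)).length : Int) := by
              simp only [List.length_cons]; push_cast; omega
            rw [if_pos h3, if_pos h4]
            have h5 : (t - wc - 1).toNat = (t - (wc + 1) - 1).toNat + 1 := by omega
            simp [h5]
          · rw [if_neg h3, if_neg]
            simp only [List.length_cons]; push_cast; omega
      · have h1 : loopA t (c :: cs) i (!PySem.Chars.isspace prev) wc
            = loopA t cs (i + 1) (!PySem.Chars.isspace c) wc := by
          simp [loopA, hc, hp]
        have h2 : startsFrom prev (c :: cs) i = startsFrom c cs (i + 1) := by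
          simp [startsFrom, hp]
        rw [h1, h2, ih]

-- startsFrom depends on prev only through isspace prev, when it matters
theorem startsFrom_congr (cs : List Char) (p q : Char) (i : Int)
    (h : PySem.Chars.isspace p = PySem.Chars.isspace q) :
    startsFrom p cs i = startsFrom q cs i := by
  cases cs with
  | nil => rfl
  | cons c cs => simp [startsFrom, h]

-- dropping leading whitespace does not change the start table (offsets shift by the drop)
theorem startsFrom_dropWhile (cs : List Char) : ∀ (i : Int),
    startsFrom ' ' cs i
      = startsFrom ' ' (cs.dropWhile PySem.Chars.isspace)
          (i + ((cs.length : Int) - ((cs.dropWhile PySem.Chars.isspace).length : Int))) := by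
  induction cs with
  | nil => intro i; simp [List.dropWhile]
  | cons c cs ih =>
    intro i
    by_cases hc : PySem.Chars.isspace c = true
    · have h1 : startsFrom ' ' (c :: cs) i = startsFrom c cs (i + 1) := by
        simp [startsFrom, hc]
      rw [h1, startsFrom_congr cs c ' ' _ (by rw [hc, isspace_space]), ih]
      simp only [List.dropWhile, hc]
      congr 1
      simp only [List.length_cons]
      push_cast
      omega
    · simp only [List.dropWhile, hc]
      congr 1
      omega

-- after a nonspace prev, skipping the current word (wordLenB) reaches the next boundary
theorem startsFrom_skipWord (l : List Char) : ∀ (p : Char) (i : Int),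
    PySem.Chars.isspace p = false →
    startsFrom p l i = startsFrom ' ' (l.drop (wordLenB l)) (i + (wordLenB l : Int)) := by
  induction l with
  | nil => intro p i _; simp [wordLenB, startsFrom]
  | cons c cs ih =>
    intro p i hp
    by_cases hc : PySem.Chars.isspace c = true
    · have hk : wordLenB (c :: cs) = 0 := by simp [wordLenB, hc]
      have h1 : startsFrom p (c :: cs) i = startsFrom c cs (i + 1) := by
        simp [startsFrom, hc]
      have h2 : startsFrom ' ' (c :: cs) i = startsFrom c cs (i + 1) := by
        simp [startsFrom, hc]
      rw [hk]; simp only [List.drop_zero, Nat.cast_zero, add_zero]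
      rw [h1, h2]
    · have hk : wordLenB (c :: cs) = 1 + wordLenB cs := by simp [wordLenB, hc]
      have h1 : startsFrom p (c :: cs) i = startsFrom c cs (i + 1) := by
        simp [startsFrom, hp]
      rw [hk, h1, ih c (i + 1) (by simpa using hc)]
      simp only [List.drop_succ_cons, Nat.add_comm 1 (wordLenB cs)]
      congr 1
      push_cast
      ring

-- B's loop computes a lookup into the start table
theorem goB_eq (n : Nat) : ∀ (rest : List Char) (pos : Int),
    goB rest pos (n + 1)
      = (if n < (startsFrom ' ' rest pos).length then
          (startsFrom ' ' rest pos).getD n (-1)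
        else -1) := by
  induction n with
  | zero =>
    intro rest pos
    rw [goB, startsFrom_dropWhile rest pos]
    cases htr : rest.dropWhile PySem.Chars.isspace with
    | nil => simp [startsFrom]
    | cons c cs =>
      have hc : PySem.Chars.isspace c = false := by
        have := List.head_dropWhile_not (p := PySem.Chars.isspace) (l := rest)
          (by simp [htr])
        simpa [htr] using this
      simp [startsFrom, isspace_space, hc, List.isEmpty]
  | succ m ih =>
    intro rest pos
    rw [goB, startsFrom_dropWhile rest pos]
    cases htr : rest.dropWhile PySem.Chars.isspace with
    | nil => simp [startsFrom]
    | cons c cs =>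
      have hc : PySem.Chars.isspace c = false := by
        have := List.head_dropWhile_not (p := PySem.Chars.isspace) (l := rest)
          (by simp [htr])
        simpa [htr] using this
      have hk : wordLenB (c :: cs) = 1 + wordLenB cs := by simp [wordLenB, hc]
      have hs : ∀ j : Int, startsFrom ' ' (c :: cs) j
          = j :: startsFrom ' ' ((c :: cs).drop (wordLenB (c :: cs)))
              (j + (wordLenB (c :: cs) : Int)) := by
        intro j
        have h1 : startsFrom ' ' (c :: cs) j = j :: startsFrom c cs (j + 1) := by
          simp [startsFrom, isspace_space, hc]
        rw [h1, startsFrom_skipWord cs c (j + 1) hc, hk,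
          Nat.add_comm 1 (wordLenB cs)]
        simp only [List.drop_succ_cons]
        congr 1
        push_cast
        ring
      simp only [List.isEmpty_cons, Bool.false_eq_true, if_false, Nat.succ_ne_zero]
      rw [ih, hs]
      simp only [List.length_cons, List.getD_cons_succ, Nat.succ_lt_succ_iff]

-- ===== VERDICT (by name: the statement is the Claim_ definition above) =====
theorem find_split_char_index_py_spec : Claim_equal_find_split_char_index_py := by
  intro text t _
  show find_split_char_index_py text t = find_split_char_index_py_alt text t
  unfold find_split_char_index_py find_split_char_index_py_alt
  have hA := loopA_eq t text.toList ' ' 0 0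
  simp only [show (!PySem.Chars.isspace ' ') = false from rfl] at hA
  rw [hA]
  by_cases ht : t < 1
  · rw [if_pos ht, if_neg]; omega
  · rw [if_neg ht]
    have hn : t.toNat = (t - 1).toNat + 1 := by omega
    rw [hn, goB_eq]
    by_cases hcond : 0 < t ∧ t ≤ 0 + ((startsFrom ' ' text.toList 0).length : Int)
    · rw [if_pos hcond, if_pos (by omega)]
      congr 1
      omega
    · rw [if_neg hcond, if_neg (by omega)]
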